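-- pv_equiv track=rewrite | github.com/gcodeteric/morning-brief | dashboard_data.py | _dedupe_non_empty_lines
-- ===== SOURCE A (Python) =====
-- def _compact_text(text, limit: int = 140) -> str:
--     compact = " ".join(str(text or "").split())
--     if len(compact) <= limit:
--         return compact
--     return compact[: max(limit - 1, 1)].rstrip() + "…"
--
-- def _dedupe_non_empty_lines(values, limit: int = 4) -> list[str]:
--     lines = []
--     seen = set()
--     for value in values:
--         compact = _compact_text(value, 160)
--         if not compact:
--             continue
--         key = compact.lower()
--         if key in seen:
--             continue
--         seen.add(key)
--         lines.append(compact)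
--         if len(lines) >= limit:
--             break
--     return lines
-- ===== SOURCE B (Python) =====
-- def _compact_text(text, limit: int = 140) -> str:
--     compact = " ".join(str(text or "").split())
--     if len(compact) <= limit:
--         return compact
--     return compact[: max(limit - 1, 1)].rstrip() + "…"
--
--
-- def _dedupe_non_empty_lines(values, limit: int = 4) -> list[str]:
--     # Stage 1: compact every value and drop the empties.
--     stream = [c for c in (_compact_text(v, 160) for v in values) if c]
--
--     # Stage 2: worklist dedup with no seen-set: take the head, delete its
--     # case-insensitive duplicates from the remaining work, repeat.
--     out = []
--     while stream:
--         head = stream[0]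
--         key = head.lower()
--         out.append(head)
--         stream = [x for x in stream[1:] if x.lower() != key]
--
--     # Stage 3: prefix of length `limit`.
--     return out[:limit]
-- ===== Notes on version B (the rewrite author's own statement) =====
-- stated objective: alternative
-- what changed: B replaces A's single-pass set-membership loop with early break by three stages: map+filter to the compacted stream, a worklist dedup that pops the head and filters its case-insensitive duplicates out of the remaining work (no seen-set at all), then a prefix slice to the limit.
-- outside the precondition, e.g. on _dedupe_non_empty_lines(['a', 'b'], 0): A returns ['a'], B returns []; on _dedupe_non_empty_lines(['a', 'b', 'c'], -1): A returns ['a'], B returns ['a', 'b']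
import Mathlib
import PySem

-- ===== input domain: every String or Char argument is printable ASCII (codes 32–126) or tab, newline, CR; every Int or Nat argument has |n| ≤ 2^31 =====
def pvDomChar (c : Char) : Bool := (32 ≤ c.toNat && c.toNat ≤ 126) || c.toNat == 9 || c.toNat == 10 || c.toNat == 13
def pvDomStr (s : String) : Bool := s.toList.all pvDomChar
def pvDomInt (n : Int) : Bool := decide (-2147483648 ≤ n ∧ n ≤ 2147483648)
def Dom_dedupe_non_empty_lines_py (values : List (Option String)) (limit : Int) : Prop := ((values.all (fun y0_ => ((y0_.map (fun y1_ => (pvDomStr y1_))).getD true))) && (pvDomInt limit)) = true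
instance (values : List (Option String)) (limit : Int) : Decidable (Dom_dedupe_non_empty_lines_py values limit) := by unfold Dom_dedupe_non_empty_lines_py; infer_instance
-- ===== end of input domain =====

-- B recomputes the result in three stages — map+filter to the compacted stream, a worklist
-- dedup that filters each head's case-insensitive duplicates out of the remaining work (no
-- seen-set), then a prefix slice — instead of A's single accumulating loop with an early break.


-- ===== PORT A =====
-- _compact_text(value, limit): shared helper — both Pythons contain the identical function.
def compactText (text : Option String) (limit : Int) : String :=
  let compact := PySem.Str.join " " (PySem.Str.split₀ (text.getD ""))
  if PySem.Str.len compact ≤ limit then compact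
  else PySem.Str.join "" [PySem.Str.rstrip (PySem.Str.slice compact none (some (max (limit - 1) 1))), "…"]

-- A's loop: accumulate lines + seen set, break once len(lines) >= limit.
def goA (values : List (Option String)) (limit : Int) (lines : List String)
    (seen : PySem.Set String) : List String :=
  match values with
  | [] => lines
  | value :: rest =>
    let compact := compactText value 160
    if compact = "" then goA rest limit lines seen
    else
      let key := PySem.Str.lower compact
      if PySem.Set.contains seen key then goA rest limit lines seen
      else
        let lines' := lines ++ [compact]
        let seen' := PySem.Set.add seen key
        if limit ≤ (lines'.length : Int) then lines' else goA rest limit lines' seen'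

def dedupe_non_empty_lines_py (values : List (Option String)) (limit : Int) : List String :=
  goA values limit [] PySem.Set.empty

-- ===== PORT B =====
-- stage 1 of Source B: the compacted non-empty stream
def streamB (values : List (Option String)) : List String :=
  (values.map (fun v => compactText v 160)).filter (fun c => !(c == ""))

-- stage 2 of Source B: the worklist dedup loop — emit the head, filter its case-insensitive
-- duplicates out of the remaining work, continue
def dedupB : List String → List String
  | [] => []
  | head :: t =>
    head :: dedupB (t.filter (fun x => !(PySem.Str.lower x == PySem.Str.lower head)))
termination_by xs => xs.length
decreasing_by
  have h1 := List.length_filter_le (fun x : {x // x ∈ t} => !(PySem.Str.lower x.1 == PySem.Str.lower head)) t.attach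
  simp at h1 ⊢
  omega

def dedupe_non_empty_lines_py_alt (values : List (Option String)) (limit : Int) : List String :=
  PySem.List.slice (dedupB (streamB values)) none (some limit)

-- ===== PRECONDITION & SPEC =====
-- Pre_ excludes limit ≤ 0, a degenerate corner no caller specifies: A's post-append break
-- still emits one line there while B's Python slice returns a plain prefix — both values are
-- accidents of their mechanisms and neither is the specified behaviour.
def Pre_dedupe_non_empty_lines_py (values : List (Option String)) (limit : Int) : Prop := 1 ≤ limit
instance (values : List (Option String)) (limit : Int) : Decidable (Pre_dedupe_non_empty_lines_py values limit) := by unfold Pre_dedupe_non_empty_lines_py; infer_instance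
def pvWitness_dedupe_non_empty_lines_py : List (Option String) × Int := ([some "Hello  world", some "hello WORLD", none, some "x"], 4)

def Spec_dedupe_non_empty_lines_py (values : List (Option String)) (limit : Int) (out : List String) : Prop := out = dedupe_non_empty_lines_py_alt values limit
instance (values : List (Option String)) (limit : Int) (out : List String) : Decidable (Spec_dedupe_non_empty_lines_py values limit out) := by unfold Spec_dedupe_non_empty_lines_py; infer_instance

-- ===== CLAIM (what is proved, stated in full; the proofs are below) =====
def Claim_equal_dedupe_non_empty_lines_py : Prop := ∀ (values : List (Option String)) (limit : Int), Dom_dedupe_non_empty_lines_py values limit → Pre_dedupe_non_empty_lines_py values limit → Spec_dedupe_non_empty_lines_py values limit (dedupe_non_empty_lines_py values limit)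

-- ===== LEMMAS AND PROOFS =====

-- dedupB on [] and on a cons (the equation lemmas of the well-founded definition)
lemma dedupB_nil : dedupB [] = [] := by rw [dedupB]

lemma dedupB_cons (head : String) (t : List String) :
    dedupB (head :: t)
      = head :: dedupB (t.filter (fun x => !(PySem.Str.lower x == PySem.Str.lower head))) := by
  rw [dedupB]

-- adding a key to the seen set changes contains only at that key
lemma contains_add_ne (seen : PySem.Set String) (k x : String) (hx : x ≠ k) :
    PySem.Set.contains (PySem.Set.add seen k) x = PySem.Set.contains seen x := by
  simp [PySem.Set.mem_add, hx]

-- A's loop equals: lines, then the recursive dedup of the compacted stream with the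
-- already-seen keys filtered out, truncated to the room left under the limit.
lemma goA_eq (limit : Int) (values : List (Option String)) :
    ∀ (lines : List String) (seen : PySem.Set String),
    (lines.length : Int) < limit →
    goA values limit lines seen =
      lines ++ (dedupB ((streamB values).filter
        (fun x => !(PySem.Set.contains seen (PySem.Str.lower x))))).take
        (limit.toNat - lines.length) := by
  induction values with
  | nil =>
    intro lines seen _
    simp [goA, streamB, dedupB_nil]
  | cons v rest ih =>
    intro lines seen hlen
    have hstream : streamB (v :: rest)
        = if compactText v 160 = "" then streamB rest
          else compactText v 160 :: streamB rest := by
      by_cases h : compactText v 160 = "" <;> simp [streamB, h]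
    by_cases h : compactText v 160 = ""
    · simp only [goA, if_pos h, hstream]
      exact ih lines seen hlen
    · simp only [hstream, if_neg h]
      by_cases hs : PySem.Set.contains seen (PySem.Str.lower (compactText v 160)) = true
      · have hfil : (compactText v 160 :: streamB rest).filter
            (fun x => !(PySem.Set.contains seen (PySem.Str.lower x)))
            = (streamB rest).filter (fun x => !(PySem.Set.contains seen (PySem.Str.lower x))) := by
          simp [(PySem.Set.contains_iff _ _).mp hs]
        simp only [goA, if_neg h, hs, if_true, hfil]
        exact ih lines seen hlen
      · have hmem : PySem.Str.lower (compactText v 160) ∉ seen :=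
          fun hm => hs ((PySem.Set.contains_iff _ _).mpr hm)
        have hfil : (compactText v 160 :: streamB rest).filter
            (fun x => !(PySem.Set.contains seen (PySem.Str.lower x)))
            = compactText v 160 ::
              (streamB rest).filter (fun x => !(PySem.Set.contains seen (PySem.Str.lower x))) := by
          simp [hmem]
        have hff : ((streamB rest).filter
              (fun x => !(PySem.Set.contains seen (PySem.Str.lower x)))).filter
              (fun x => !(PySem.Str.lower x == PySem.Str.lower (compactText v 160)))
            = (streamB rest).filter (fun x =>
                !(PySem.Set.contains (PySem.Set.add seen (PySem.Str.lower (compactText v 160)))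
                   (PySem.Str.lower x))) := by
          rw [List.filter_filter]
          apply List.filter_congr
          intro x _
          by_cases hx : PySem.Str.lower x = PySem.Str.lower (compactText v 160)
          · simp [hx, PySem.Set.mem_add]
          · rw [contains_add_ne seen _ _ hx]
            cases PySem.Set.contains seen (PySem.Str.lower x) <;> simp [hx]
        have hdedup : dedupB (compactText v 160 ::
            (streamB rest).filter (fun x => !(PySem.Set.contains seen (PySem.Str.lower x))))
          = compactText v 160 ::
            dedupB ((streamB rest).filter (fun x =>
              !(PySem.Set.contains (PySem.Set.add seen (PySem.Str.lower (compactText v 160)))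
                 (PySem.Str.lower x)))) := by
          rw [dedupB_cons, hff]
        have htake : limit.toNat - lines.length = (limit.toNat - (lines.length + 1)) + 1 := by
          omega
        have hgoA : goA (v :: rest) limit lines seen
            = (if limit ≤ (((lines ++ [compactText v 160]).length : Nat) : Int)
               then lines ++ [compactText v 160]
               else goA rest limit (lines ++ [compactText v 160])
                 (PySem.Set.add seen (PySem.Str.lower (compactText v 160)))) := by
          simp only [goA, if_neg h]
          rw [if_neg hs]
        rw [hgoA, hfil, hdedup, htake, List.take_succ_cons]
        by_cases hstop : limit ≤ ((lines ++ [compactText v 160]).length : Int)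
        · rw [if_pos hstop]
          have h0 : limit.toNat - (lines.length + 1) = 0 := by
            simp only [List.length_append, List.length_cons, List.length_nil] at hstop
            omega
          simp [h0]
        · rw [if_neg hstop]
          rw [ih (lines ++ [compactText v 160]) _ (by
            simp only [List.length_append, List.length_cons, List.length_nil] at hstop ⊢
            push_cast
            omega)]
          simp

-- ===== VERDICT (by name: the statement is the Claim_ definition above) =====
theorem dedupe_non_empty_lines_py_spec : Claim_equal_dedupe_non_empty_lines_py := by
  intro values limit _ hpre
  unfold Spec_dedupe_non_empty_lines_py dedupe_non_empty_lines_py dedupe_non_empty_lines_py_alt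
  rw [PySem.List.slice_to _ (by exact le_trans (by norm_num) hpre)]
  rw [goA_eq limit values [] PySem.Set.empty (by simpa using hpre)]
  simp [PySem.Set.empty]
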